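-- pv_equiv track=rewrite | github.com/oflatt/lean-decomp | scripts/bench_grind.py | _collect_indented_block
-- ===== SOURCE A (Python) =====
-- def _collect_indented_block(lines, start, first_part=""):
--     """Collect a multi-line suggestion preserving relative indentation."""
--     tag_indent = len(lines[start]) - len(lines[start].lstrip())
--     parts = [first_part] if first_part else []
--     base_indent = None
--     i = start + 1
--     while i < len(lines):
--         raw = lines[i]
--         stripped = raw.strip()
--         indent = len(raw) - len(raw.lstrip())
--         if stripped and indent <= tag_indent:
--             break
--         if stripped:
--             if base_indent is None:
--                 base_indent = indent
--             parts.append(" " * max(indent - base_indent, 0) + stripped)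
--         i += 1
--     return "\n".join(parts).strip()
-- ===== SOURCE B (Python) =====
-- def _collect_indented_block(lines, start, first_part=""):
--     """Collect a multi-line suggestion preserving relative indentation."""
--     tag_indent = len(lines[start]) - len(lines[start].lstrip())
--
--     def go(i, base):
--         """Reindented body lines from index i on, recursively (no accumulator)."""
--         if i >= len(lines):
--             return []
--         stripped = lines[i].strip()
--         indent = len(lines[i]) - len(lines[i].lstrip())
--         if stripped and indent <= tag_indent:
--             return []
--         if not stripped:
--             return go(i + 1, base)
--         b = indent if base is None else base
--         return [" " * max(indent - b, 0) + stripped] + go(i + 1, b)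
--
--     parts = ([first_part] if first_part else []) + go(start + 1, None)
--     return "\n".join(parts).strip()
-- ===== Notes on version B (the rewrite author's own statement) =====
-- stated objective: alternative
-- what changed: Replaces A's imperative while-loop with mutable state (base_indent reassigned, parts appended in place) by a pure recursive helper go(i, base) that threads the base indent through the recursion and builds the reindented block by list construction, prepending first_part afterwards.
import Mathlib
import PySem

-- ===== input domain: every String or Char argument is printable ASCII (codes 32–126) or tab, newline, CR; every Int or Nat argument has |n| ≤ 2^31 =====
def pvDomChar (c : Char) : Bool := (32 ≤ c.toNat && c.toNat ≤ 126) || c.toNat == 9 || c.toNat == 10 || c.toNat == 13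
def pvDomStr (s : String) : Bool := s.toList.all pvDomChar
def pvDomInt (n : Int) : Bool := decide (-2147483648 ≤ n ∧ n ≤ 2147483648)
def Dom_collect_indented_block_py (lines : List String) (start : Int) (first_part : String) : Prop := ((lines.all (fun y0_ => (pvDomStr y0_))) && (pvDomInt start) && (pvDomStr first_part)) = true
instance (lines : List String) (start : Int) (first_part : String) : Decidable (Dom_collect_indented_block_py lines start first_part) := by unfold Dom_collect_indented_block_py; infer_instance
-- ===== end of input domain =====

-- B replaces A's stateful while-loop (mutable base_indent, parts list appended as it scans) by a
-- pure recursion on the line index that builds the reindented lines by consing — alternative decomposition, same cost.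

-- shared tiny helpers (both Pythons compute these very expressions)
-- indent(l) = len(l) - len(l.lstrip())
def pvIndent (raw : String) : Int := PySem.Str.len raw - PySem.Str.len (PySem.Str.lstrip raw)
-- " " * n + s  (n already max'd to be ≥ 0 at every use site)
def pvPad (n : Int) (s : String) : String := String.ofList (List.replicate n.toNat ' ' ++ s.toList)

-- ===== PORT A =====
-- A's while-loop over i = start+1 … len(lines)-1 (i a Python index, negative wrap via pyGetD),
-- as a fold-style recursion over that index range with A's state (parts accumulator, optional base_indent).
def pvALoop (lines : List String) (tag : Int) : List Int → Option Int → List String → List String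
  | [], _, parts => parts
  | i :: rest, base, parts =>
    let raw := PySem.List.pyGetD lines i ""
    let stripped := PySem.Str.strip raw
    let indent := pvIndent raw
    if stripped ≠ "" ∧ indent ≤ tag then parts
    else if stripped ≠ "" then
      let b := base.getD indent
      pvALoop lines tag rest (some b) (parts ++ [pvPad (max (indent - b) 0) stripped])
    else pvALoop lines tag rest base parts

def collect_indented_block_py (lines : List String) (start : Int) (first_part : String) : String :=
  let tag := pvIndent (PySem.List.pyGetD lines start "")   -- lines[start] (in range under Pre_)
  let parts0 := if first_part ≠ "" then [first_part] else []
  PySem.Str.strip (PySem.Str.join "\n"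
    (pvALoop lines tag (PySem.List.pyRange (start + 1) (lines.length : Int) 1) none parts0))

-- ===== PORT B =====
-- Source B's recursive go(i, base): stops at the end or at the first dedented non-blank line,
-- skips blanks, conses each reindented line onto the recursive result.
def pvGo (lines : List String) (tag : Int) (i : Int) (base : Option Int) : List String :=
  if _h : (lines.length : Int) ≤ i then []
  else
    let raw := PySem.List.pyGetD lines i ""
    let stripped := PySem.Str.strip raw
    let indent := pvIndent raw
    if stripped ≠ "" ∧ indent ≤ tag then []
    else if stripped = "" then pvGo lines tag (i + 1) base
    else
      let b := base.getD indent
      pvPad (max (indent - b) 0) stripped :: pvGo lines tag (i + 1) (some b)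
termination_by ((lines.length : Int) - i).toNat
decreasing_by all_goals omega

def collect_indented_block_py_alt (lines : List String) (start : Int) (first_part : String) : String :=
  let tag := pvIndent (PySem.List.pyGetD lines start "")
  PySem.Str.strip (PySem.Str.join "\n"
    ((if first_part ≠ "" then [first_part] else []) ++ pvGo lines tag (start + 1) none))

-- ===== PRECONDITION & SPEC =====
-- Pre_ excludes exactly the starts outside [-len(lines), len(lines)), on which A raises IndexError at lines[start].
def Pre_collect_indented_block_py (lines : List String) (start : Int) (first_part : String) : Prop :=
  -(lines.length : Int) ≤ start ∧ start < (lines.length : Int)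
instance (lines : List String) (start : Int) (first_part : String) : Decidable (Pre_collect_indented_block_py lines start first_part) := by unfold Pre_collect_indented_block_py; infer_instance

def pvWitness_collect_indented_block_py : List String × Int × String := (["tag:", "  a", "   b"], 0, "head")

def Spec_collect_indented_block_py (lines : List String) (start : Int) (first_part : String) (out : String) : Prop := out = collect_indented_block_py_alt lines start first_part
instance (lines : List String) (start : Int) (first_part : String) (out : String) : Decidable (Spec_collect_indented_block_py lines start first_part out) := by unfold Spec_collect_indented_block_py; infer_instance

-- ===== CLAIM (what is proved, stated in full; the proofs are below) =====
def Claim_equal_collect_indented_block_py : Prop := ∀ (lines : List String) (start : Int) (first_part : String), Dom_collect_indented_block_py lines start first_part → Pre_collect_indented_block_py lines start first_part → Spec_collect_indented_block_py lines start first_part (collect_indented_block_py lines start first_part)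

-- ===== LEMMAS AND PROOFS =====

-- A's accumulator loop over range(i, len) equals parts ++ B's recursion from i.
theorem pvALoop_eq (lines : List String) (tag : Int) :
    ∀ (n : Nat) (i : Int), ((lines.length : Int) - i).toNat = n → ∀ (base : Option Int) (parts : List String),
      pvALoop lines tag (PySem.List.pyRange i (lines.length : Int) 1) base parts
        = parts ++ pvGo lines tag i base := by
  intro n
  induction n with
  | zero =>
    intro i hi base parts
    rw [PySem.List.pyRange_one_eq_nil (by omega), pvGo, dif_pos (by omega : (lines.length : Int) ≤ i)]
    simp [pvALoop]
  | succ n ih =>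
    intro i hi base parts
    by_cases hend : (lines.length : Int) ≤ i
    · rw [PySem.List.pyRange_one_eq_nil (by omega), pvGo, dif_pos hend]
      simp [pvALoop]
    · rw [PySem.List.pyRange_one_cons (by omega), pvGo, dif_neg hend]
      simp only [pvALoop]
      by_cases hstop : PySem.Str.strip (PySem.List.pyGetD lines i "") ≠ "" ∧ pvIndent (PySem.List.pyGetD lines i "") ≤ tag
      · rw [if_pos hstop, if_pos hstop]
        simp
      · rw [if_neg hstop, if_neg hstop]
        by_cases hnb : PySem.Str.strip (PySem.List.pyGetD lines i "") = ""
        · rw [if_neg (not_not_intro hnb), if_pos hnb]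
          exact ih (i + 1) (by omega) base parts
        · rw [if_pos hnb, if_neg hnb, ih (i + 1) (by omega)]
          simp

-- ===== VERDICT (by name: the statement is the Claim_ definition above) =====
theorem collect_indented_block_py_spec : Claim_equal_collect_indented_block_py := by
  intro lines start first_part _ _
  unfold Spec_collect_indented_block_py
  simp only [collect_indented_block_py, collect_indented_block_py_alt,
    pvALoop_eq lines _ ((lines.length : Int) - (start + 1)).toNat (start + 1) rfl]
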